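-- pv_equiv track=rewrite | github.com/VinayFaria/CS669 | Assignment 1/nls_data/hist_nls_updated.py | hist_feature1
-- ===== SOURCE A (Python) =====
-- def hist_feature1(bins_class_feature, trainingdata):
--     hist_dict = {}
--     for i in range(len(bins_class_feature)-1):
--         hist_dict[(bins_class_feature[i],bins_class_feature[i+1])] = 0
--         for j in trainingdata:
--             if j[0] >= bins_class_feature[i] and j[0] < bins_class_feature[i+1]:
--                 hist_dict[(bins_class_feature[i],bins_class_feature[i+1])] += 1
--             else:
--                 continue
--     return hist_dict
-- ===== SOURCE B (Python) =====
-- def hist_feature1(bins_class_feature, trainingdata):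
--     hist_dict = {}
--     edges = list(zip(bins_class_feature, bins_class_feature[1:]))
--     if edges:
--         counts = {}
--         for row in trainingdata:
--             x = row[0]
--             counts[x] = counts.get(x, 0) + 1
--         for lo, hi in edges:
--             hist_dict[(lo, hi)] = sum(c for v, c in counts.items() if lo <= v < hi)
--     return hist_dict
-- ===== Notes on version B (the rewrite author's own statement) =====
-- stated objective: alternative
-- what changed: Instead of rescanning all of trainingdata for every bin interval, B builds a multiplicity map of the first column in one pass and aggregates each bin over the distinct values only, taking interval pairs by zip instead of index arithmetic (intended as faster; a timing run measured about 1.77x at the largest size both finished but could not confirm the threshold).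
import Mathlib
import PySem

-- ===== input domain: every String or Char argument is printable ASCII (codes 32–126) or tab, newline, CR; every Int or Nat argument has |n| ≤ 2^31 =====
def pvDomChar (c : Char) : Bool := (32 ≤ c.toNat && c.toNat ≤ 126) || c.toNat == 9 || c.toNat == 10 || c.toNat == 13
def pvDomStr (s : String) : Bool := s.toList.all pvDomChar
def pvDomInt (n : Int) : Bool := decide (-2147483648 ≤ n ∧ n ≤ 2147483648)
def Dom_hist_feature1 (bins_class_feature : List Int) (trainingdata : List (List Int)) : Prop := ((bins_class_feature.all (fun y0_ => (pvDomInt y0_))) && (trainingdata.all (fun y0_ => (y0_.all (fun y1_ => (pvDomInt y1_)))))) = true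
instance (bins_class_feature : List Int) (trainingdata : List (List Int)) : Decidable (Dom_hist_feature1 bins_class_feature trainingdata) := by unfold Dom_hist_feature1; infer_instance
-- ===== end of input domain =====

-- B replaces A's per-bin rescan of all training points by one multiplicity map of the
-- first column, aggregated per bin over distinct values only (a different algorithm).


-- ===== PORT A =====
def hist_feature1 (bins_class_feature : List Int) (trainingdata : List (List Int)) : List (Int × Int × Int) :=
  let hist_dict : PySem.Dict (Int × Int) Int :=
    (PySem.List.pyRange 0 ((bins_class_feature.length : Int) - 1) 1).foldl
      (fun d i =>
        let d := d.insert (PySem.List.pyGetD bins_class_feature i 0,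
                           PySem.List.pyGetD bins_class_feature (i+1) 0) 0
        trainingdata.foldl
          (fun d j =>
            if PySem.List.pyGetD j 0 0 ≥ PySem.List.pyGetD bins_class_feature i 0 ∧
               PySem.List.pyGetD j 0 0 < PySem.List.pyGetD bins_class_feature (i+1) 0 then
              d.insert (PySem.List.pyGetD bins_class_feature i 0,
                        PySem.List.pyGetD bins_class_feature (i+1) 0)
                (d.getD (PySem.List.pyGetD bins_class_feature i 0,
                         PySem.List.pyGetD bins_class_feature (i+1) 0) 0 + 1)
            else d) d)
      PySem.Dict.empty
  hist_dict.items.map (fun p => (p.1.1, p.1.2, p.2))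

-- ===== PORT B =====
def hist_feature1_alt (bins_class_feature : List Int) (trainingdata : List (List Int)) : List (Int × Int × Int) :=
  let edges := bins_class_feature.zip (PySem.List.slice bins_class_feature (some 1) none)
  let hist_dict : PySem.Dict (Int × Int) Int :=
    if edges.isEmpty then PySem.Dict.empty
    else
      let counts : PySem.Dict Int Int :=
        trainingdata.foldl
          (fun d row =>
            let x := PySem.List.pyGetD row 0 0
            d.insert x (d.getD x 0 + 1))
          PySem.Dict.empty
      edges.foldl
        (fun h e =>
          h.insert e
            (((counts.items.filter (fun vc => decide (e.1 ≤ vc.1) && decide (vc.1 < e.2))).map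
                (fun vc => vc.2)).sum))
        PySem.Dict.empty
  hist_dict.items.map (fun p => (p.1.1, p.1.2, p.2))

-- ===== PRECONDITION & SPEC =====
-- Pre_ excludes exactly the inputs on which the Python A raises IndexError:
-- at least two bin edges together with an empty row in trainingdata (A reads j[0] of every row).
def Pre_hist_feature1 (bins_class_feature : List Int) (trainingdata : List (List Int)) : Prop :=
  bins_class_feature.length ≤ 1 ∨ ∀ row ∈ trainingdata, row ≠ []
instance (bins_class_feature : List Int) (trainingdata : List (List Int)) : Decidable (Pre_hist_feature1 bins_class_feature trainingdata) := by unfold Pre_hist_feature1; infer_instance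

def pvWitness_hist_feature1 : List Int × List (List Int) := ([0, 5, 10], [[1], [6], [7]])

def Spec_hist_feature1 (bins_class_feature : List Int) (trainingdata : List (List Int)) (out : List (Int × Int × Int)) : Prop := out = hist_feature1_alt bins_class_feature trainingdata
instance (bins_class_feature : List Int) (trainingdata : List (List Int)) (out : List (Int × Int × Int)) : Decidable (Spec_hist_feature1 bins_class_feature trainingdata out) := by unfold Spec_hist_feature1; infer_instance

-- ===== CLAIM (what is proved, stated in full; the proofs are below) =====
def Claim_equal_hist_feature1 : Prop := ∀ (bins_class_feature : List Int) (trainingdata : List (List Int)), Dom_hist_feature1 bins_class_feature trainingdata → Pre_hist_feature1 bins_class_feature trainingdata → Spec_hist_feature1 bins_class_feature trainingdata (hist_feature1 bins_class_feature trainingdata)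

-- ===== LEMMAS AND PROOFS =====

-- first element of a row, as both ports read it
def pvHead (j : List Int) : Int := PySem.List.pyGetD j 0 0

-- A's inner loop over trainingdata only ever touches `key`: it adds the number of matches.
lemma pv_innerA (key : Int × Int) (lo hi : Int) (td : List (List Int)) :
    ∀ (d : PySem.Dict (Int × Int) Int) (c : Int),
      td.foldl
        (fun d j => if pvHead j ≥ lo ∧ pvHead j < hi then
            d.insert key (d.getD key 0 + 1) else d) (d.insert key c)
        = d.insert key (c + (td.countP (fun j => decide (pvHead j ≥ lo ∧ pvHead j < hi)) : Int)) := by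
  induction td with
  | nil => intro d c; simp
  | cons j td ih =>
      intro d c
      by_cases h : pvHead j ≥ lo ∧ pvHead j < hi
      · simp only [List.foldl_cons, if_pos h, PySem.Dict.getD_insert_self,
          PySem.Dict.insert_insert_self]
        rw [ih d (c + 1)]
        congr 1
        simp [h]
        ring
      · simp only [List.foldl_cons, if_neg h]
        rw [ih d c]
        congr 2
        simp [h]

-- disjoint split of a membership countP at a fresh head
lemma pv_countP_mem_cons (Q : Int → Bool) (v : Int) (l : List Int) (hv : v ∉ l) (xs : List Int) :
    xs.countP (fun x => Q x && decide (x ∈ v :: l))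
      = (if Q v then xs.count v else 0) + xs.countP (fun x => Q x && decide (x ∈ l)) := by
  induction xs with
  | nil => simp
  | cons x xs ih =>
      simp only [List.countP_cons, List.count_cons, ih]
      by_cases hxv : x = v
      · subst hxv
        by_cases hq : Q x <;> simp [hq, hv] <;> omega
      · by_cases hq : Q x <;> by_cases hm : x ∈ l <;> simp [hxv, hq, hm] <;> omega

-- summing per-value multiplicities over a duplicate-free value list counts the matches
lemma pv_sum_counts (Q : Int → Bool) (xs : List Int) :
    ∀ l : List Int, l.Nodup →
      (((l.filter Q).map (fun k => (xs.count k : Int))).sum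
        = (xs.countP (fun x => Q x && decide (x ∈ l)) : Int)) := by
  intro l
  induction l with
  | nil => intro _; simp
  | cons v l ih =>
      intro hnd
      have hv : v ∉ l := (List.nodup_cons.mp hnd).1
      have hl : l.Nodup := (List.nodup_cons.mp hnd).2
      rw [pv_countP_mem_cons Q v l hv xs]
      by_cases hq : Q v
      · simp [hq, ih hl]
      · simp [hq, ih hl]

-- the per-interval value B inserts equals the number of matching first elements
lemma pv_B_value (lo hi : Int) (xs : List Int) :
    ((((PySem.Dict.counter xs).items.filter
        (fun vc => decide (lo ≤ vc.1) && decide (vc.1 < hi))).map (fun vc => vc.2)).sum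
      = (xs.countP (fun x => decide (lo ≤ x) && decide (x < hi)) : Int)) := by
  rw [PySem.Dict.items_counter]
  rw [List.filter_map, List.map_map]
  have h := pv_sum_counts (fun v => decide (lo ≤ v) && decide (v < hi)) xs
      (PySem.Set.ofList xs) (PySem.Set.nodup_ofList xs)
  simp only [Function.comp_def] at h ⊢
  rw [h]
  congr 1
  apply List.countP_congr
  intro x hx
  simp [PySem.Set.mem_ofList, hx]

-- the value A accumulates for an interval equals the value B inserts there
lemma pv_value (lo hi : Int) (td : List (List Int)) :
    ((((PySem.Dict.counter (td.map pvHead)).items.filter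
        (fun vc => decide (lo ≤ vc.1) && decide (vc.1 < hi))).map (fun vc => vc.2)).sum)
      = (0 : Int) + (td.countP (fun j => decide (pvHead j ≥ lo ∧ pvHead j < hi)) : Int) := by
  rw [pv_B_value, List.countP_map, zero_add]
  congr 1
  apply List.countP_congr
  intro j _
  simp [Function.comp, pvHead, ge_iff_le]

-- the edge list A indexes out of bins equals zip bins (tail bins)
lemma pv_edges (bins : List Int) :
    (PySem.List.pyRange 0 ((bins.length : Int) - 1) 1).map
        (fun i => (PySem.List.pyGetD bins i 0, PySem.List.pyGetD bins (i+1) 0))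
      = bins.zip bins.tail := by
  apply List.ext_getElem
  · simp [PySem.List.length_pyRange_one, List.length_zip, List.length_tail]
  · intro k h1 h2
    simp only [List.length_map, PySem.List.length_pyRange_one] at h1
    have hk : k + 1 < bins.length := by omega
    simp only [List.getElem_map, PySem.List.getElem_pyRange_one, List.getElem_zip,
      List.getElem_tail]
    rw [PySem.List.pyGetD_eq_getElem bins (i := 0 + (k:Int)) 0 (by omega) (by omega),
        PySem.List.pyGetD_eq_getElem bins (i := 0 + (k:Int) + 1) 0 (by omega) (by omega)]
    refine Prod.ext ?_ ?_ <;> simp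

-- ===== VERDICT (by name: the statement is the Claim_ definition above) =====
theorem hist_feature1_spec : Claim_equal_hist_feature1 := by
  intro bins td _ _
  unfold Spec_hist_feature1 hist_feature1 hist_feature1_alt
  dsimp only
  rw [PySem.List.slice_from_one]
  -- B's counter is the counter of the first column
  have hcounter :
      td.foldl (fun d row => d.insert (PySem.List.pyGetD row 0 0)
          (d.getD (PySem.List.pyGetD row 0 0) 0 + 1)) PySem.Dict.empty
        = PySem.Dict.counter (td.map pvHead) := by
    rw [← PySem.Dict.foldl_insert_getD_add_one_eq_counter, List.foldl_map]
    rfl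
  -- A's loop as a fold over the edge list
  have hA :
      (PySem.List.pyRange 0 ((bins.length : Int) - 1) 1).foldl
        (fun d i =>
          td.foldl
            (fun d j =>
              if PySem.List.pyGetD j 0 0 ≥ PySem.List.pyGetD bins i 0 ∧
                 PySem.List.pyGetD j 0 0 < PySem.List.pyGetD bins (i+1) 0 then
                d.insert (PySem.List.pyGetD bins i 0, PySem.List.pyGetD bins (i+1) 0)
                  (d.getD (PySem.List.pyGetD bins i 0, PySem.List.pyGetD bins (i+1) 0) 0 + 1)
              else d)
            (d.insert (PySem.List.pyGetD bins i 0, PySem.List.pyGetD bins (i+1) 0) 0))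
        PySem.Dict.empty
      = (bins.zip bins.tail).foldl
          (fun d e => d.insert e
            ((0 : Int) + (td.countP (fun j => decide (pvHead j ≥ e.1 ∧ pvHead j < e.2)) : Int)))
          PySem.Dict.empty := by
    rw [← pv_edges bins, List.foldl_map]
    apply PySem.List.foldl_congr_mem
    intro d i _
    exact pv_innerA (PySem.List.pyGetD bins i 0, PySem.List.pyGetD bins (i+1) 0)
      (PySem.List.pyGetD bins i 0) (PySem.List.pyGetD bins (i+1) 0) td d 0
  rw [hA, hcounter]
  by_cases he : (bins.zip bins.tail).isEmpty
  · rw [List.isEmpty_iff.mp he]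
    simp
  · rw [if_neg (by simp [he])]
    congr 2
    apply PySem.List.foldl_congr_mem
    intro h e _
    rw [pv_value e.1 e.2 td]
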